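-- pv_equiv track=rewrite | github.com/Alex110506/lsd_lab_python | grafuri/p5.py | f
-- ===== SOURCE A (Python) =====
-- def f(acc,lista,nod):
--     if(len(lista)==0):
--         return acc
--
--     if(nod**2 in acc):
--         acc[nod**2].append(lista[0]**2)
--     else:
--         acc[nod**2] = [lista[0]**2]
--
--     return f(acc,lista[1:],nod)
-- ===== SOURCE B (Python) =====
-- def f(acc, lista, nod):
--     # Simpler: square everything once, then do a single bulk dict update
--     # (one extend / one assignment) instead of per-element recursion.
--     sq = [x ** 2 for x in lista]
--     if not sq:
--         return acc
--     key = nod ** 2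
--     if key in acc:
--         acc[key].extend(sq)
--     else:
--         acc[key] = sq
--     return acc
-- ===== Notes on version B (the rewrite author's own statement) =====
-- stated objective: faster
-- what changed: Replaced A's per-element head/tail recursion (one dict lookup and one append per recursive call, plus lista[1:] copying each step) with a non-recursive version that squares the list once and performs a single dict lookup and one bulk extend/assignment.
import Mathlib
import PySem

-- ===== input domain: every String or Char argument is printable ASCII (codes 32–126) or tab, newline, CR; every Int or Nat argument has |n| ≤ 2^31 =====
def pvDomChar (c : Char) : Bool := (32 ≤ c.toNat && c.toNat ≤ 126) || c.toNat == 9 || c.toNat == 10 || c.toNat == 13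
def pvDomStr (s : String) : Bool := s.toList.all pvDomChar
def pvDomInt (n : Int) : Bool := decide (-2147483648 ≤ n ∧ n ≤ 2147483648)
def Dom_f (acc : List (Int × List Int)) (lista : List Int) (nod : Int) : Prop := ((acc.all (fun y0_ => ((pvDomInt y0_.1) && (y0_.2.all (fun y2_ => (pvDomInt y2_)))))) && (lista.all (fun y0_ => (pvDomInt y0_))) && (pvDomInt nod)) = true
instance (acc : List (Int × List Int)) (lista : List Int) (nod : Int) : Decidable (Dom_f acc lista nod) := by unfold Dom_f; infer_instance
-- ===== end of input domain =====

-- B replaces A's per-element recursion with one bulk dict update (objective: simpler).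
-- A mutates acc in place in Python; B performs the same mutation; equivalence here is about the returned value.

-- ===== PORT A =====
-- literal transliteration of A's recursion, on the dict
def fRec (d : PySem.Dict Int (List Int)) (lista : List Int) (nod : Int) : PySem.Dict Int (List Int) :=
  match lista with
  | [] => d
  | x :: rest =>
    let d' := if d.contains (nod ^ 2) then d.modify (nod ^ 2) [] (· ++ [x ^ 2])
              else d.insert (nod ^ 2) [x ^ 2]
    fRec d' rest nod

def f (acc : List (Int × List Int)) (lista : List Int) (nod : Int) : List (Int × List Int) :=
  (fRec (PySem.Dict.mk acc) lista nod).items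

-- ===== PORT B =====
def f_alt (acc : List (Int × List Int)) (lista : List Int) (nod : Int) : List (Int × List Int) :=
  let sq := lista.map (fun x => x ^ 2)
  if sq = [] then acc
  else
    let d := PySem.Dict.mk acc
    (if d.contains (nod ^ 2) then d.modify (nod ^ 2) [] (· ++ sq)
     else d.insert (nod ^ 2) sq).items

-- ===== PRECONDITION & SPEC =====
def Spec_f (acc : List (Int × List Int)) (lista : List Int) (nod : Int) (out : List (Int × List Int)) : Prop := out = f_alt acc lista nod
instance (acc : List (Int × List Int)) (lista : List Int) (nod : Int) (out : List (Int × List Int)) : Decidable (Spec_f acc lista nod out) := by unfold Spec_f; infer_instance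

-- ===== CLAIM (what is proved, stated in full; the proofs are below) =====
def Claim_equal_f : Prop := ∀ (acc : List (Int × List Int)) (lista : List Int) (nod : Int), Dom_f acc lista nod → Spec_f acc lista nod (f acc lista nod)

-- ===== LEMMAS AND PROOFS =====

-- the recursion collapses to one bulk update
theorem fRec_eq (lista : List Int) (d : PySem.Dict Int (List Int)) (nod : Int)
    (h : lista ≠ []) :
    fRec d lista nod =
      if d.contains (nod ^ 2) then d.modify (nod ^ 2) [] (· ++ lista.map (fun x => x ^ 2))
      else d.insert (nod ^ 2) (lista.map (fun x => x ^ 2)) := by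
  induction lista generalizing d with
  | nil => exact absurd rfl h
  | cons x rest ih =>
    by_cases hr : rest = []
    · subst hr
      simp [fRec]
    · simp only [fRec]
      by_cases hc : d.contains (nod ^ 2)
      · rw [if_pos hc, ih _ hr]
        rw [if_pos (by simp [PySem.Dict.contains_modify, hc])]
        simp only [PySem.Dict.modify, PySem.Dict.getD_insert_self,
          PySem.Dict.insert_insert_self, List.map_cons, List.append_assoc,
          List.singleton_append]
        rw [if_pos hc]
      · rw [if_neg hc, ih _ hr]
        rw [if_pos (by simp)]
        rw [if_neg hc]
        simp only [PySem.Dict.modify, PySem.Dict.getD_insert_self,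
          PySem.Dict.insert_insert_self, List.map_cons, List.singleton_append]

-- ===== VERDICT (by name: the statement is the Claim_ definition above) =====
theorem f_spec : Claim_equal_f := by
  intro acc lista nod _
  unfold Spec_f f f_alt
  by_cases h : lista = []
  · subst h; simp [fRec]
  · rw [fRec_eq lista _ nod h]
    simp [h]
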